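-- pv_equiv track=rewrite | github.com/qsantos/advent-of-code | 2017/day24/main.py | strongest_bridge
-- ===== SOURCE A (Python) =====
-- from typing import Set, Tuple
--
-- Component = Tuple[int, int]
--
-- def strongest_bridge(components: Set[Component]) -> int:
--     def aux(current_port: int) -> int:
--         # always use identity component if possible
--         component = (current_port, current_port)
--         if component in components:
--             components.remove(component)
--             best = aux(current_port) + current_port + current_port
--             components.add(component)
--             return best
--         # try other components
--         best = 0
--         for component in list(components):
--             a, b = component
--             if a == current_port:
--                 components.remove(component)
--                 best = max(best, aux(b) + a + b)
--                 components.add(component)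
--             if b == current_port:
--                 components.remove(component)
--                 best = max(best, aux(a) + a + b)
--                 components.add(component)
--         return best
--     return aux(0)
-- ===== SOURCE B (Python) =====
-- from collections import defaultdict
--
--
-- def strongest_bridge(components):
--     # adjacency index: port -> components incident to it (self-loops listed once)
--     index = defaultdict(list)
--     for comp in components:
--         a, b = comp
--         index[a].append(comp)
--         if a != b:
--             index[b].append(comp)
--     used = set()
--
--     def aux(port):
--         loop = (port, port)
--         if loop in components and loop not in used:
--             used.add(loop)
--             best = aux(port) + port + port
--             used.remove(loop)
--             return best
--         best = 0
--         for comp in index[port]: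
--             if comp in used:
--                 continue
--             a, b = comp
--             used.add(comp)
--             best = max(best, aux(b if a == port else a) + a + b)
--             used.remove(comp)
--         return best
--
--     return aux(0)
-- ===== Notes on version B (the rewrite author's own statement) =====
-- stated objective: alternative
-- what changed: Replaces A's per-call scan of the whole mutable component set by a precomputed adjacency index (port -> incident components) with a 'used' set, so each recursion step iterates only over components incident to the current port.
import Mathlib
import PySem

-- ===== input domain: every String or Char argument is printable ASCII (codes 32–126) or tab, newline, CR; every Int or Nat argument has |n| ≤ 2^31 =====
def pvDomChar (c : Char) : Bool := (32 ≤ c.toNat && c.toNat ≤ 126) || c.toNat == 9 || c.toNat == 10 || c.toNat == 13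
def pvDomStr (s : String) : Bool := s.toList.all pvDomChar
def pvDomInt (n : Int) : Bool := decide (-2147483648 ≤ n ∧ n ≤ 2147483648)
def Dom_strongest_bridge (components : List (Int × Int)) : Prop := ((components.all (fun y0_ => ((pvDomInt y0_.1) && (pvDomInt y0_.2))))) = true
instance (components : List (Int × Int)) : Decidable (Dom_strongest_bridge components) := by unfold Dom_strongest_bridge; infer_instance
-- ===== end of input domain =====

-- B replaces A's full-set scan per call (with set mutation/backtracking) by a precomputed
-- adjacency index port → incident components plus a `used` set: alternative data structure,
-- same results.  A transiently mutates its argument (remove/add, restored before returning);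
-- B never mutates; the equivalence proved here is about the RETURN value only.

-- ===== PORT A =====
-- A's recursive aux: the set of remaining components is the explicit list argument;
-- `components.remove`/`add` around a recursive call becomes passing `components.erase c`.
def strongest_bridge_auxA (components : List (Int × Int)) (port : Int) : Int :=
  if h : (port, port) ∈ components then
    strongest_bridge_auxA (components.erase (port, port)) port + port + port
  else
    -- `for component in list(components)`: fold over the snapshot (attach only for termination)
    components.attach.foldl (fun best c =>
      let r1 := if c.1.1 = port then
          max best (strongest_bridge_auxA (components.erase c.1) c.1.2 + c.1.1 + c.1.2)
        else best
      if c.1.2 = port then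
          max r1 (strongest_bridge_auxA (components.erase c.1) c.1.1 + c.1.1 + c.1.2)
        else r1) 0
termination_by components.length
decreasing_by
  · have := List.length_erase_of_mem h
    have := List.length_pos_of_mem h
    omega
  · have := List.length_erase_of_mem c.2
    have := List.length_pos_of_mem c.2
    omega
  · have := List.length_erase_of_mem c.2
    have := List.length_pos_of_mem c.2
    omega

def strongest_bridge (components : List (Int × Int)) : Int :=
  strongest_bridge_auxA components 0

-- ===== PORT B =====
-- index[a].append(comp); if a != b: index[b].append(comp)
def pvAdjStep (d : PySem.Dict Int (List (Int × Int))) (c : Int × Int) :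
    PySem.Dict Int (List (Int × Int)) :=
  let d1 := d.modify c.1 [] (· ++ [c])
  if c.1 = c.2 then d1 else d1.modify c.2 [] (· ++ [c])

-- B's aux: iterates only over index[port], skipping used components; the `fuel`
-- argument (components.length at the top call) is only a totality guard, never
-- exhausted on the admitted inputs (proved below).
def strongest_bridge_auxB (adj : PySem.Dict Int (List (Int × Int)))
    (components : List (Int × Int)) :
    Nat → List (Int × Int) → Int → Int
  | 0, _, _ => 0
  | fuel + 1, used, port =>
    if (port, port) ∈ components ∧ (port, port) ∉ used then
      strongest_bridge_auxB adj components fuel ((port, port) :: used) port + port + port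
    else
      (adj.getD port []).foldl (fun best c =>
        if c ∈ used then best
        else max best (strongest_bridge_auxB adj components fuel (c :: used)
              (if c.1 = port then c.2 else c.1) + c.1 + c.2)) 0

def strongest_bridge_alt (components : List (Int × Int)) : Int :=
  strongest_bridge_auxB (components.foldl pvAdjStep PySem.Dict.empty) components
    components.length [] 0

-- ===== PRECONDITION & SPEC =====
-- The Python parameter is a set; the list argument encodes its distinct elements,
-- so Pre_ only states that encoding invariant (no duplicate components).
def Pre_strongest_bridge (components : List (Int × Int)) : Prop := components.Nodup
instance (components : List (Int × Int)) : Decidable (Pre_strongest_bridge components) := by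
  unfold Pre_strongest_bridge; infer_instance
def pvWitness_strongest_bridge : (List (Int × Int)) := [(0, 1), (1, 2), (2, 2)]

def Spec_strongest_bridge (components : List (Int × Int)) (out : Int) : Prop :=
  out = strongest_bridge_alt components
instance (components : List (Int × Int)) (out : Int) :
    Decidable (Spec_strongest_bridge components out) := by
  unfold Spec_strongest_bridge; infer_instance

-- ===== CLAIM (what is proved, stated in full; the proofs are below) =====
def Claim_equal_strongest_bridge : Prop :=
  ∀ (components : List (Int × Int)), Dom_strongest_bridge components →
    Pre_strongest_bridge components →
    Spec_strongest_bridge components (strongest_bridge components)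

-- ===== LEMMAS AND PROOFS =====

-- the adjacency index characterised: index[p] is the incident components, in input order
theorem pv_adj_getD (l : List (Int × Int)) (d : PySem.Dict Int (List (Int × Int))) (p : Int) :
    (l.foldl pvAdjStep d).getD p [] =
      d.getD p [] ++ l.filter (fun c => c.1 == p || c.2 == p) := by
  induction l generalizing d with
  | nil => simp
  | cons c l ih =>
    simp only [List.foldl_cons, ih, List.filter_cons]
    have hstep : (pvAdjStep d c).getD p [] =
        d.getD p [] ++ (if (c.1 == p || c.2 == p) = true then [c] else []) := by
      unfold pvAdjStep
      split_ifs with h12 <;>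
        simp only [PySem.Dict.getD_modify] <;>
          split_ifs <;> simp_all <;> omega
    rw [hstep, List.append_assoc]
    by_cases hb : (c.1 == p || c.2 == p) = true <;> simp [hb]

theorem strongest_bridge_main (components : List (Int × Int)) (hnd : components.Nodup) :
    ∀ (fuel : Nat) (used : List (Int × Int)) (port : Int),
      (components.filter (fun c => decide (c ∉ used))).length ≤ fuel →
      strongest_bridge_auxA (components.filter (fun c => decide (c ∉ used))) port =
        strongest_bridge_auxB (components.foldl pvAdjStep PySem.Dict.empty) components
          fuel used port := by
  intro fuel
  induction fuel with
  | zero =>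
    intro used port hlen
    have h0 : components.filter (fun c => decide (c ∉ used)) = [] :=
      List.eq_nil_of_length_eq_zero (Nat.le_zero.mp hlen)
    rw [h0, strongest_bridge_auxA, strongest_bridge_auxB]
    simp
  | succ fuel ih =>
    intro used port hlen
    set rem := components.filter (fun c => decide (c ∉ used)) with hrem
    have hremnd : rem.Nodup := hnd.filter _
    have hmemrem : ∀ c : Int × Int, c ∈ rem ↔ c ∈ components ∧ c ∉ used := by
      intro c; simp [hrem]
    -- the erased list seen by A = the list filtered by the grown `used` seen by B
    have herase : ∀ c : Int × Int, c ∈ rem →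
        rem.erase c = components.filter (fun x => decide (x ∉ c :: used)) := by
      intro c hc
      rw [hremnd.erase_eq_filter, hrem, List.filter_filter]
      apply List.filter_congr
      intro x _
      by_cases hxu : x ∈ used <;> by_cases hxc : x = c <;> simp [hxu, hxc]
    have hlenerase : ∀ c : Int × Int, c ∈ rem →
        (components.filter (fun x => decide (x ∉ c :: used))).length ≤ fuel := by
      intro c hc
      have h1 := List.length_erase_of_mem hc
      have h2 := List.length_pos_of_mem hc
      rw [← herase c hc]; omega
    rw [strongest_bridge_auxA, strongest_bridge_auxB]
    by_cases hloop : (port, port) ∈ components ∧ (port, port) ∉ used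
    · have hin : (port, port) ∈ rem := (hmemrem _).mpr hloop
      rw [dif_pos hin, if_pos hloop, herase _ hin,
        ih ((port, port) :: used) port (hlenerase _ hin)]
    · have hnin : (port, port) ∉ rem := fun h => hloop ((hmemrem _).mp h)
      rw [dif_neg hnin, if_neg hloop]
      -- A's snapshot fold: drop attach, merge the two sequential ifs into one
      rw [List.foldl_attach (f := fun best c =>
        let r1 := if c.1 = port then
            max best (strongest_bridge_auxA (rem.erase c) c.2 + c.1 + c.2) else best
        if c.2 = port then
            max r1 (strongest_bridge_auxA (rem.erase c) c.1 + c.1 + c.2) else r1)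
        (b := 0) (l := rem)]
      have hA : rem.foldl (fun best c =>
          let r1 := if c.1 = port then
              max best (strongest_bridge_auxA (rem.erase c) c.2 + c.1 + c.2) else best
          if c.2 = port then
              max r1 (strongest_bridge_auxA (rem.erase c) c.1 + c.1 + c.2) else r1) 0 =
        rem.foldl (fun best c =>
          if c.1 = port ∨ c.2 = port then
            max best (strongest_bridge_auxA (rem.erase c)
              (if c.1 = port then c.2 else c.1) + c.1 + c.2)
          else best) 0 := by
        apply PySem.List.foldl_congr_mem
        intro best c hc
        have hne : ¬(c.1 = port ∧ c.2 = port) := by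
          rintro ⟨h1, h2⟩
          have hcp : c = (port, port) := Prod.ext h1 h2
          exact hnin (hcp ▸ hc)
        by_cases h1 : c.1 = port <;> by_cases h2 : c.2 = port <;>
          simp [h1, h2] at hne ⊢
      rw [hA, PySem.List.foldl_ite_eq_foldl_filter]
      -- B's fold: flip the skip-if, then filter out the used components
      have hB : (((components.foldl pvAdjStep PySem.Dict.empty).getD port []).foldl
          (fun best c => if c ∈ used then best
            else max best (strongest_bridge_auxB
              (components.foldl pvAdjStep PySem.Dict.empty) components fuel (c :: used)
              (if c.1 = port then c.2 else c.1) + c.1 + c.2)) 0) =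
          ((components.filter (fun c => c.1 == port || c.2 == port)).filter
              (fun c => decide (c ∉ used))).foldl
            (fun best c => max best (strongest_bridge_auxB
              (components.foldl pvAdjStep PySem.Dict.empty) components fuel (c :: used)
              (if c.1 = port then c.2 else c.1) + c.1 + c.2)) 0 := by
        rw [pv_adj_getD, PySem.Dict.getD_empty, List.nil_append,
          ← PySem.List.foldl_ite_eq_foldl_filter]
        apply PySem.List.foldl_congr_mem
        intro best c hc
        by_cases hcu : c ∈ used <;> simp [hcu]
      rw [hB]
      -- the two candidate lists are the same list
      have hlists : rem.filter (fun c => decide (c.1 = port ∨ c.2 = port)) =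
          (components.filter (fun c => c.1 == port || c.2 == port)).filter
            (fun c => decide (c ∉ used)) := by
        rw [hrem, List.filter_comm]
        congr 1
        apply List.filter_congr
        intro x _
        by_cases h1 : x.1 = port <;> by_cases h2 : x.2 = port <;> simp [h1, h2]
      rw [hlists]
      -- pointwise: recursive values agree by the induction hypothesis
      apply PySem.List.foldl_congr_mem
      intro best c hc
      have hc1 : c ∈ rem.filter (fun c => decide (c.1 = port ∨ c.2 = port)) := by
        rw [hlists]; exact hc
      have hcrem : c ∈ rem := List.mem_of_mem_filter hc1
      rw [herase _ hcrem, ih (c :: used) _ (hlenerase _ hcrem)]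

-- ===== VERDICT (by name: the statement is the Claim_ definition above) =====
theorem strongest_bridge_spec : Claim_equal_strongest_bridge := by
  intro components _hdom hpre
  unfold Spec_strongest_bridge strongest_bridge strongest_bridge_alt
  have h := strongest_bridge_main components hpre components.length [] 0 (by simp)
  simpa using h
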